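-- pv_equiv track=rewrite | github.com/CSalcedoDataBI/BI_Challenges | 407_EXCEL_CHALLENGE/EXCEL CHALLENGE 407 Python.py | mirror_cipher_caesar_shift
-- ===== SOURCE A (Python) =====
-- def mirror_cipher_caesar_shift(plaintext, shift):
--     """
--     This function applies a mirror cipher followed by a Caesar cipher.
--
--     - First, it reverses the order of the words and then reverses the letters within each word.
--     - Then it applies a Caesar shift with the given value.
--
--     Parameters:
--     - plaintext: The original text to be encrypted.
--     - shift: Shift value for the Caesar cipher.
--
--     Returns:
--     - Encrypted text applying the mirror cipher first and then the Caesar cipher.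
--     """
--     # Reverse the order of the words
--     words_reversed = plaintext.split()[::-1]
--     # Reverse the letters within each word
--     mirrored_sentence = ' '.join(word[::-1] for word in words_reversed)
--     # Apply the Caesar cipher
--     encrypted_sentence = ''.join(
--         chr(((ord(char) - 65 + shift) % 26) + 65) if char.isupper() else
--         chr(((ord(char) - 97 + shift) % 26) + 97) if char.islower() else char
--         for char in mirrored_sentence
--     )
--     return encrypted_sentence
-- ===== SOURCE B (Python) =====
-- def mirror_cipher_caesar_shift(plaintext, shift):
--     """Single right-to-left scan: emits the mirrored text directly, one char at
--     a time, collapsing whitespace with a pending-space flag, Caesar-shifting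
--     letters as they are emitted (no split/join/per-word reversal stages)."""
--     out = []
--     pending = False
--     for c in reversed(plaintext):
--         if c.isspace():
--             pending = bool(out)
--         else:
--             if pending:
--                 out.append(' ')
--             if 'A' <= c <= 'Z':
--                 out.append(chr((ord(c) - 65 + shift) % 26 + 65))
--             elif 'a' <= c <= 'z':
--                 out.append(chr((ord(c) - 97 + shift) % 26 + 97))
--             else:
--                 out.append(c)
--             pending = False
--     return ''.join(out)
-- ===== Notes on version B (the rewrite author's own statement) =====
-- stated objective: alternative
-- what changed: B replaces A's staged pipeline (split into words, reverse the list, reverse each word, join, then a second Caesar pass) by one right-to-left scan over the raw string that emits the encrypted mirrored text directly, collapsing whitespace with a pending-space flag.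
import Mathlib
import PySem

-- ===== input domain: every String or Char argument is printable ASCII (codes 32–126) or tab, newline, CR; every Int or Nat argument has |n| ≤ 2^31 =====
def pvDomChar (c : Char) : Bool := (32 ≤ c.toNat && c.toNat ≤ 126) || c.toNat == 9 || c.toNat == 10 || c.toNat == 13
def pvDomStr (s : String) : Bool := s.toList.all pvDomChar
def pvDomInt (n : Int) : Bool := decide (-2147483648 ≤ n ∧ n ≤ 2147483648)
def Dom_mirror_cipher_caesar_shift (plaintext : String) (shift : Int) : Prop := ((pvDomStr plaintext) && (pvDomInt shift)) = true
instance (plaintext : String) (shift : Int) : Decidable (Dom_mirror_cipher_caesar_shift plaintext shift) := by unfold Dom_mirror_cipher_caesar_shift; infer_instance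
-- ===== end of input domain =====

-- B replaces A's staged split/reverse/join + second Caesar pass by ONE right-to-left scan
-- emitting the encrypted mirrored text directly (pending-space flag); objective: alternative, same cost.

-- ===== PORT A =====
-- the per-character Caesar expression of A's generator (exact: chr/ord are Char.ofNat/Char.toNat on these in-range codes)
def pvCaesarA (shift : Int) (c : Char) : Char :=
  if PySem.Chars.isupper c then
    Char.ofNat ((PySem.Int.mod ((c.toNat : Int) - 65 + shift) 26 + 65).toNat)
  else if PySem.Chars.islower c then
    Char.ofNat ((PySem.Int.mod ((c.toNat : Int) - 97 + shift) 26 + 97).toNat)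
  else c

def mirror_cipher_caesar_shift (plaintext : String) (shift : Int) : String :=
  -- plaintext.split()[::-1]  (list [::-1] is reverse)
  let words_reversed := (PySem.Str.split₀ plaintext).reverse
  -- ' '.join(word[::-1] for word in words_reversed)  (word[::-1] reverses the word)
  let mirrored_sentence := PySem.Str.join " " (words_reversed.map (fun w => String.ofList w.toList.reverse))
  -- ''.join(<caesar> for char in mirrored_sentence)
  String.ofList (mirrored_sentence.toList.map (pvCaesarA shift))

-- ===== PORT B =====
-- the loop body of B's single scan; state = (out, pending)
def pvStepB (shift : Int) (st : List Char × Bool) (c : Char) : List Char × Bool :=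
  if PySem.Chars.isspace c then
    -- pending = bool(out)
    (st.1, !st.1.isEmpty)
  else
    -- if pending: out.append(' ')
    let out := if st.2 then st.1 ++ [' '] else st.1
    -- the three-way letter test, appending the (possibly shifted) character
    let out :=
      if decide ('A' ≤ c) && decide (c ≤ 'Z') then
        out ++ [Char.ofNat ((PySem.Int.mod ((c.toNat : Int) - 65 + shift) 26 + 65).toNat)]
      else if decide ('a' ≤ c) && decide (c ≤ 'z') then
        out ++ [Char.ofNat ((PySem.Int.mod ((c.toNat : Int) - 97 + shift) 26 + 97).toNat)]
      else out ++ [c]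
    (out, false)

def mirror_cipher_caesar_shift_alt (plaintext : String) (shift : Int) : String :=
  -- for c in reversed(plaintext): …   then ''.join(out)
  String.ofList ((plaintext.toList.reverse).foldl (pvStepB shift) ([], false)).1

-- ===== PRECONDITION & SPEC =====
def Spec_mirror_cipher_caesar_shift (plaintext : String) (shift : Int) (out : String) : Prop := out = mirror_cipher_caesar_shift_alt plaintext shift
instance (plaintext : String) (shift : Int) (out : String) : Decidable (Spec_mirror_cipher_caesar_shift plaintext shift out) := by unfold Spec_mirror_cipher_caesar_shift; infer_instance

-- ===== CLAIM (what is proved, stated in full; the proofs are below) =====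
def Claim_equal_mirror_cipher_caesar_shift : Prop := ∀ (plaintext : String) (shift : Int), Dom_mirror_cipher_caesar_shift plaintext shift → Spec_mirror_cipher_caesar_shift plaintext shift (mirror_cipher_caesar_shift plaintext shift)

-- ===== LEMMAS AND PROOFS =====

-- ---------- A-side: the mirrored sentence is the reverse of the normalized text ----------

-- intercalate over a snoc of a nonempty list appends one more separator and piece
lemma pvInterAppend (sep x : List Char) : ∀ zs : List (List Char), zs ≠ [] →
    List.intercalate sep (zs ++ [x]) = List.intercalate sep zs ++ sep ++ x := by
  intro zs
  induction zs with
  | nil => intro h; exact absurd rfl h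
  | cons z zs ih =>
    intro _
    cases zs with
    | nil => simp [List.intercalate, List.intersperse]
    | cons w ws =>
      have := ih (by simp)
      simp only [List.cons_append] at *
      simp [List.intercalate, List.intersperse] at this ⊢
      simp [this]

-- reversing a joined list = joining the reversed pieces in reverse order (sep reversed too)
lemma pvRevIntercalate (sep : List Char) (parts : List (List Char)) :
    (List.intercalate sep parts).reverse
      = List.intercalate sep.reverse (parts.map List.reverse).reverse := by
  induction parts with
  | nil => simp [List.intercalate]
  | cons x xs ih =>
    cases xs with
    | nil => simp [List.intercalate]
    | cons y ys =>
      have h1 : List.intercalate sep (x :: y :: ys) = x ++ sep ++ List.intercalate sep (y :: ys) := by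
        simp [List.intercalate, List.intersperse]
      rw [h1,
        show (List.map List.reverse (x :: y :: ys)).reverse
            = (List.map List.reverse (y :: ys)).reverse ++ [x.reverse] by simp,
        pvInterAppend _ _ _ (by simp), ← ih]
      simp

-- A's mirrored sentence carries the reverse of the normalized character list
lemma pvMirrorEq (plaintext : String) :
    (PySem.Str.join " " ((PySem.Str.split₀ plaintext).reverse.map
        (fun w => String.ofList w.toList.reverse))).toList
      = (PySem.Str.join " " (PySem.Str.split₀ plaintext)).toList.reverse := by
  rw [PySem.Str.toList_join, PySem.Str.toList_join]
  show PySem.Chars.join [' '] _ = (PySem.Chars.join [' '] _).reverse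
  unfold PySem.Chars.join
  rw [pvRevIntercalate]
  simp only [List.map_map, List.map_reverse, Function.comp_def, String.toList_ofList,
    List.reverse_singleton]


-- ---------- split₀ machinery ----------

lemma pvGoCons (c : Char) (rest cur : List Char) (acc : List (List Char)) :
    PySem.Chars.split₀.go (c :: rest) cur acc
      = if PySem.Chars.isspace c then
          (if cur.isEmpty then PySem.Chars.split₀.go rest [] acc
           else PySem.Chars.split₀.go rest [] (cur.reverse :: acc))
        else PySem.Chars.split₀.go rest (c :: cur) acc := by
  simp [PySem.Chars.split₀.go]

lemma pvGoNil (cur : List Char) (acc : List (List Char)) :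
    PySem.Chars.split₀.go [] cur acc
      = if cur.isEmpty then acc.reverse else (cur.reverse :: acc).reverse := by
  simp [PySem.Chars.split₀.go]

-- pull the accumulator out of go
lemma pvGoAcc : ∀ (cs cur : List Char) (acc : List (List Char)),
    PySem.Chars.split₀.go cs cur acc = acc.reverse ++ PySem.Chars.split₀.go cs cur [] := by
  intro cs
  induction cs with
  | nil =>
    intro cur acc
    rw [pvGoNil, pvGoNil]
    by_cases h : cur.isEmpty <;> simp [h]
  | cons c rest ih =>
    intro cur acc
    rw [pvGoCons, pvGoCons]
    by_cases hs : PySem.Chars.isspace c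
    · by_cases hc : cur.isEmpty
      · simp only [hs, hc, if_true]
        exact ih [] acc
      · simp only [hs, hc, if_true, Bool.false_eq_true, if_false]
        rw [ih [] (cur.reverse :: acc), ih [] [cur.reverse]]
        simp
    · simp only [hs, Bool.false_eq_true, if_false]
      exact ih (c :: cur) acc

-- split₀ drops a leading space
lemma pvSplitSpace (c : Char) (l : List Char) (hs : PySem.Chars.isspace c = true) :
    PySem.Chars.split₀ (c :: l) = PySem.Chars.split₀ l := by
  unfold PySem.Chars.split₀
  rw [pvGoCons]
  simp [hs]

-- split₀ of an all-space list is empty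
lemma pvSplitAll : ∀ l : List Char, l.all PySem.Chars.isspace = true → PySem.Chars.split₀ l = [] := by
  intro l
  induction l with
  | nil => intro _; rfl
  | cons c rest ih =>
    intro h
    simp only [List.all_cons, Bool.and_eq_true] at h
    rw [pvSplitSpace c rest h.1]
    exact ih h.2

-- go with a nonempty current word: the word closes at the next space
lemma pvGoWord : ∀ (cs cur : List Char), cur ≠ [] →
    PySem.Chars.split₀.go cs cur []
      = (cur.reverse ++ cs.takeWhile (fun d => !PySem.Chars.isspace d))
          :: PySem.Chars.split₀ (cs.dropWhile (fun d => !PySem.Chars.isspace d)) := by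
  intro cs
  induction cs with
  | nil =>
    intro cur hcur
    rw [pvGoNil]
    simp [hcur, PySem.Chars.split₀, pvGoNil]
  | cons c rest ih =>
    intro cur hcur
    rw [pvGoCons]
    by_cases hs : PySem.Chars.isspace c
    · have hc : cur.isEmpty = false := by simp [hcur]
      simp only [hs, hc, if_true, Bool.false_eq_true, if_false]
      rw [pvGoAcc]
      simp only [List.takeWhile_cons, List.dropWhile_cons, hs, Bool.not_true,
        Bool.false_eq_true, if_false]
      rw [pvSplitSpace c rest hs]
      simp [PySem.Chars.split₀]
    · simp only [hs, Bool.false_eq_true, if_false]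
      rw [ih (c :: cur) (by simp)]
      simp [hs]

-- split₀ with a leading word character
lemma pvSplitWord (c : Char) (l : List Char) (hs : PySem.Chars.isspace c = false) :
    PySem.Chars.split₀ (c :: l)
      = (c :: l.takeWhile (fun d => !PySem.Chars.isspace d))
          :: PySem.Chars.split₀ (l.dropWhile (fun d => !PySem.Chars.isspace d)) := by
  unfold PySem.Chars.split₀
  rw [pvGoCons]
  simp only [hs, Bool.false_eq_true, if_false]
  rw [pvGoWord l [c] (by simp)]
  rfl

-- a list with a non-space character splits into at least one word
lemma pvSplitNe : ∀ l : List Char, l.all PySem.Chars.isspace = false → PySem.Chars.split₀ l ≠ [] := by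
  intro l
  induction l with
  | nil => intro h; simp at h
  | cons c rest ih =>
    intro h
    by_cases hs : PySem.Chars.isspace c
    · rw [pvSplitSpace c rest hs]
      simp only [List.all_cons, hs, Bool.true_and] at h
      exact ih h
    · rw [pvSplitWord c rest (by simpa using hs)]
      simp

-- ---------- B-side: the scan as a three-mode output machine ----------

inductive PvMode : Type
  | hd | wd | pnd
deriving DecidableEq, Repr

def pvStepM (m : PvMode) (c : Char) : PvMode :=
  if PySem.Chars.isspace c then (if m = PvMode.hd then PvMode.hd else PvMode.pnd) else PvMode.wd

def pvMFin (m : PvMode) (cs : List Char) : PvMode := cs.foldl pvStepM m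

def pvEmitId (m : PvMode) (c : Char) : List Char :=
  if PySem.Chars.isspace c then [] else if m = PvMode.pnd then [' ', c] else [c]

def pvNormId : PvMode → List Char → List Char
  | _, [] => []
  | m, c :: cs => pvEmitId m c ++ pvNormId (pvStepM m c) cs

-- the final mode of the reversed list, by the shape of the original list
lemma pvMFinRev : ∀ l : List Char, pvMFin PvMode.hd l.reverse
    = (match l with
       | [] => PvMode.hd
       | c :: l' => if PySem.Chars.isspace c then
                      (if l'.all PySem.Chars.isspace then PvMode.hd else PvMode.pnd)
                    else PvMode.wd) := by
  intro l
  induction l with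
  | nil => rfl
  | cons c l' ih =>
    rw [List.reverse_cons]
    unfold pvMFin at ih ⊢
    rw [List.foldl_append]
    simp only [List.foldl_cons, List.foldl_nil]
    rw [ih]
    by_cases hs : PySem.Chars.isspace c
    · cases l' with
      | nil => simp [pvStepM, hs]
      | cons d l'' =>
        by_cases hd : PySem.Chars.isspace d
        · by_cases ha : l''.all PySem.Chars.isspace <;> simp [pvStepM, hs, hd, ha]
        · simp [pvStepM, hs, hd]
    · simp [pvStepM, hs]

-- the machine output is append-compatible
lemma pvNormAppend : ∀ (xs ys : List Char) (m : PvMode),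
    pvNormId m (xs ++ ys) = pvNormId m xs ++ pvNormId (pvMFin m xs) ys := by
  intro xs
  induction xs with
  | nil => intro ys m; simp [pvNormId, pvMFin]
  | cons x xs ih =>
    intro ys m
    simp only [List.cons_append, pvNormId, ih, pvMFin, List.foldl_cons, List.append_assoc]

-- the machine output of the reversed list is the reversed normalized text
lemma pvNormRev : ∀ l : List Char,
    pvNormId PvMode.hd l.reverse
      = (PySem.Chars.join [' '] (PySem.Chars.split₀ l)).reverse := by
  intro l
  induction l with
  | nil => rfl
  | cons c l' ih =>
    rw [List.reverse_cons, pvNormAppend, ih, pvMFinRev]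
    by_cases hs : PySem.Chars.isspace c
    · rw [pvSplitSpace c l' hs]
      by_cases h0 : l' = [] <;> by_cases ha : l'.all PySem.Chars.isspace <;>
        simp [h0, ha, pvNormId, pvEmitId, hs]
    · rw [pvSplitWord c l' (by simpa using hs)]
      cases l' with
      | nil => simp [pvNormId, pvEmitId, hs, PySem.Chars.split₀, pvGoNil, PySem.Chars.join, List.intercalate]
      | cons d l'' =>
        by_cases hd : PySem.Chars.isspace d
        · have htw : (d :: l'').takeWhile (fun x => !PySem.Chars.isspace x) = [] := by
            simp [hd]
          have hdw : (d :: l'').dropWhile (fun x => !PySem.Chars.isspace x) = d :: l'' := by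
            simp [hd]
          rw [htw, hdw]
          by_cases ha : l''.all PySem.Chars.isspace
          · have : (d :: l'').all PySem.Chars.isspace = true := by simp [hd, ha]
            rw [pvSplitAll _ this]
            simp [pvNormId, pvEmitId, hs, hd, ha, PySem.Chars.join, List.intercalate, List.intersperse]
          · have hne : PySem.Chars.split₀ (d :: l'') ≠ [] := by
              apply pvSplitNe
              simp [ha]
            obtain ⟨w, ws, hw⟩ := List.exists_cons_of_ne_nil hne
            rw [hw]
            have : PySem.Chars.join [' '] ([c] :: w :: ws)
                = [c] ++ [' '] ++ PySem.Chars.join [' '] (w :: ws) := by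
              simp [PySem.Chars.join, List.intercalate, List.intersperse]
            rw [this]
            simp [pvNormId, pvEmitId, hs, hd, ha]
        · have htw : (d :: l'').takeWhile (fun x => !PySem.Chars.isspace x)
              = d :: l''.takeWhile (fun x => !PySem.Chars.isspace x) := by
            simp [hd]
          have hdw : (d :: l'').dropWhile (fun x => !PySem.Chars.isspace x)
              = l''.dropWhile (fun x => !PySem.Chars.isspace x) := by
            simp [hd]
          rw [htw, hdw, pvSplitWord d l'' (by simpa using hd)]
          have hjoin : ∀ (w : List Char) (ws : List (List Char)),
              PySem.Chars.join [' '] ((c :: w) :: ws) = c :: PySem.Chars.join [' '] (w :: ws) := by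
            intro w ws
            cases ws <;> simp [PySem.Chars.join, List.intercalate, List.intersperse]
          rw [hjoin]
          simp [pvNormId, pvEmitId, hs, hd]


-- Caesar fixes the space character (for every shift)
lemma pvCaesarSpace (shift : Int) : pvCaesarA shift ' ' = ' ' := rfl

-- the scan loop computes the machine output, Caesar-shifted
lemma pvLoopB (shift : Int) : ∀ (cs out : List Char) (m : PvMode),
    (out.isEmpty = true ↔ m = PvMode.hd) →
    cs.foldl (pvStepB shift) (out, m == PvMode.pnd)
      = (out ++ (pvNormId m cs).map (pvCaesarA shift), pvMFin m cs == PvMode.pnd) := by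
  intro cs
  induction cs with
  | nil => intro out m h; simp [pvNormId, pvMFin]
  | cons c cs ih =>
    intro out m h
    rw [List.foldl_cons]
    by_cases hs : PySem.Chars.isspace c
    · have hstep : pvStepB shift (out, m == PvMode.pnd) c = (out, !out.isEmpty) := by
        simp [pvStepB, hs]
      have hm : pvStepM m c = if m = PvMode.hd then PvMode.hd else PvMode.pnd := by
        simp [pvStepM, hs]
      by_cases hmh : m = PvMode.hd
      · subst hmh
        have hout : out.isEmpty = true := h.mpr rfl
        have hsm : pvStepM PvMode.hd c = PvMode.hd := by simp [pvStepM, hs]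
        rw [hstep, hout]
        simp only [Bool.not_true]
        rw [show (false : Bool) = (PvMode.hd == PvMode.pnd) from rfl, ih out PvMode.hd h]
        simp [pvNormId, pvEmitId, hs, pvMFin, hsm]
      · have hout : out.isEmpty = false := by
          cases hh : out.isEmpty
          · rfl
          · exact absurd (h.mp hh) hmh
        have hsm : pvStepM m c = PvMode.pnd := by simp [pvStepM, hs, hmh]
        have hinv : (out.isEmpty = true ↔ PvMode.pnd = PvMode.hd) := by
          simp [hout]
        rw [hstep, hout]
        simp only [Bool.not_false]
        rw [show (true : Bool) = (PvMode.pnd == PvMode.pnd) from rfl, ih out PvMode.pnd hinv]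
        simp [pvNormId, pvEmitId, hs, pvMFin, hsm]
    · have henc : pvStepB shift (out, m == PvMode.pnd) c
          = ((if m == PvMode.pnd then out ++ [' '] else out) ++ [pvCaesarA shift c], false) := by
        simp only [pvStepB, hs, Bool.false_eq_true, if_false, pvCaesarA,
          PySem.Chars.isupper, PySem.Chars.islower]
        by_cases h1 : decide ('A' ≤ c) && decide (c ≤ 'Z') <;>
          by_cases h2 : decide ('a' ≤ c) && decide (c ≤ 'z') <;> simp [h1, h2]
      rw [henc]
      have hinv : ((if m == PvMode.pnd then out ++ [' '] else out) ++ [pvCaesarA shift c]).isEmpty = true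
          ↔ PvMode.wd = PvMode.hd := by
        constructor
        · intro hh; simp at hh
        · intro hh; cases hh
      have := ih ((if m == PvMode.pnd then out ++ [' '] else out) ++ [pvCaesarA shift c]) PvMode.wd hinv
      rw [show (false : Bool) = (PvMode.wd == PvMode.pnd) from rfl, this]
      have hsm : pvStepM m c = PvMode.wd := by simp [pvStepM, hs]
      by_cases hmp : m = PvMode.pnd
      · subst hmp
        simp [pvNormId, pvEmitId, hs, pvMFin, hsm, pvCaesarSpace]
      · have : (m == PvMode.pnd) = false := by simp [hmp]
        simp [pvNormId, pvEmitId, hs, hmp, this, pvMFin, hsm]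

-- ===== VERDICT (by name: the statement is the Claim_ definition above) =====
theorem mirror_cipher_caesar_shift_spec : Claim_equal_mirror_cipher_caesar_shift := by
  intro plaintext shift _
  show mirror_cipher_caesar_shift plaintext shift = mirror_cipher_caesar_shift_alt plaintext shift
  rw [mirror_cipher_caesar_shift, mirror_cipher_caesar_shift_alt]
  rw [pvMirrorEq]
  rw [show (([] : List Char), false) = (([] : List Char), (PvMode.hd == PvMode.pnd)) from rfl,
    pvLoopB shift plaintext.toList.reverse [] PvMode.hd (by simp)]
  rw [pvNormRev]
  rw [PySem.Str.toList_join, PySem.Str.split₀_map_toList]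
  simp
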